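-- pv_equiv track=rewrite | github.com/ParthVaya/ros-bridge | carla_ros_bridge/src/carla_ros_bridge/carla_path_planning_plus2.py | merge_close_edges
-- ===== SOURCE A (Python) =====
-- def merge_close_edges(lst, tol=10):
--     result = []
--     temp = []
--     for i, x in enumerate(lst):
--         if temp and abs(x - temp[0]) > tol:
--             if len(temp) == 1:
--                 result.append(temp[0])
--             else:
--                 result.append(sum(temp) // len(temp))
--             temp = []
--         temp.append(x)
--     if len(temp) == 1:
--         result.append(temp[0])
--     elif temp:
--         result.append(sum(temp) // len(temp))
--     return result
-- ===== SOURCE B (Python) =====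
-- def merge_close_edges(lst, tol=10):
--     out = []
--     i, n = 0, len(lst)
--     while i < n:
--         anchor = lst[i]
--         j = i + 1
--         while j < n and abs(lst[j] - anchor) <= tol:
--             j += 1
--         out.append(anchor if j == i + 1 else sum(lst[i:j]) // (j - i))
--         i = j
--     return out
-- ===== Notes on version B (the rewrite author's own statement) =====
-- stated objective: alternative
-- what changed: Replaced the single fold that carries a growing temp buffer and flushes it on break/at end with an index-based two-level scan: an inner while advances j over each tolerance group of the anchor lst[i], the representative is computed directly from the slice lst[i:j], and i jumps to j; no buffer and no post-loop flush.
import Mathlib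
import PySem

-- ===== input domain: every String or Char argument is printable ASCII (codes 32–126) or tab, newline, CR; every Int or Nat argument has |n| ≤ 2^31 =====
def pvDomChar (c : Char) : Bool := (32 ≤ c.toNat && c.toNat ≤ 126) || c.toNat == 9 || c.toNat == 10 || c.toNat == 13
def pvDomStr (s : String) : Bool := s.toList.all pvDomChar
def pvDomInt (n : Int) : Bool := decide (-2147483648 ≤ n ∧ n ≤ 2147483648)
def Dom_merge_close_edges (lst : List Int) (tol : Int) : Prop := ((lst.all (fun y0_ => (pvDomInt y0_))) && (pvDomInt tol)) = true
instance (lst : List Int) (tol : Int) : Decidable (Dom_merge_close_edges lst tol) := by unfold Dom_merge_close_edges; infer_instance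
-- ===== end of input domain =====

-- B replaces A's fold with a temp buffer (flushed on break and after the loop) by an
-- index-based two-level scan computing each group's representative from a slice; alternative decomposition, same cost.

-- ===== PORT A =====
-- representative of a flushed buffer: temp[0] if len(temp)==1 else sum(temp)//len(temp)
def pvRepA (temp : List Int) : Int :=
  if temp.length = 1 then temp.headD 0
  else PySem.Int.floordiv temp.sum (temp.length : Int)

-- loop body: flush temp (append its representative) when the break condition fires, else grow temp
def pvStepA (tol : Int) (st : List Int × List Int) (x : Int) : List Int × List Int :=
  match st with
  | (result, temp) =>
    match temp with
    | [] => (result, [x])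
    | t0 :: _ =>
      if tol < |x - t0| then (result ++ [pvRepA temp], [x])
      else (result, temp ++ [x])

-- the post-loop flush of the final temp
def pvFinA (st : List Int × List Int) : List Int :=
  match st with
  | (result, temp) =>
    match temp with
    | [] => result
    | _ => result ++ [pvRepA temp]

def merge_close_edges (lst : List Int) (tol : Int) : List Int :=
  pvFinA (lst.foldl (pvStepA tol) ([], []))

-- ===== PORT B =====
-- inner while: advance j while j < n and abs(lst[j] - anchor) <= tol
def pvCut (lst : List Int) (tol anchor : Int) (j : Nat) : Nat :=
  if h : j < lst.length then
    if |lst[j] - anchor| ≤ tol then pvCut lst tol anchor (j + 1) else j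
  else j
termination_by lst.length - j

theorem pvCut_ge (lst : List Int) (tol anchor : Int) (j : Nat) :
    j ≤ pvCut lst tol anchor j := by
  fun_induction pvCut with
  | case1 j h hp ih => omega
  | case2 j h hp => omega
  | case3 j h => omega

theorem pvCut_le (lst : List Int) (tol anchor : Int) (j : Nat) (hj : j ≤ lst.length) :
    pvCut lst tol anchor j ≤ lst.length := by
  fun_induction pvCut with
  | case1 j h hp ih => exact ih (by omega)
  | case2 j h hp => omega
  | case3 j h => omega

-- outer while over index i; slice lst[i:j] is (lst.drop i).take (j - i), exact for 0 ≤ i ≤ j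
def pvOuter (lst : List Int) (tol : Int) (i : Nat) : List Int :=
  if h : i < lst.length then
    let anchor := lst[i]
    let j := pvCut lst tol anchor (i + 1)
    (if j = i + 1 then anchor
     else PySem.Int.floordiv ((lst.drop i).take (j - i)).sum ((j - i : Nat) : Int))
      :: pvOuter lst tol j
  else []
termination_by lst.length - i
decreasing_by
  have h1 := pvCut_ge lst tol lst[i] (i + 1)
  have h2 := pvCut_le lst tol lst[i] (i + 1) (by omega)
  omega

def merge_close_edges_alt (lst : List Int) (tol : Int) : List Int :=
  pvOuter lst tol 0

-- ===== PRECONDITION & SPEC =====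
def Spec_merge_close_edges (lst : List Int) (tol : Int) (out : List Int) : Prop := out = merge_close_edges_alt lst tol
instance (lst : List Int) (tol : Int) (out : List Int) : Decidable (Spec_merge_close_edges lst tol out) := by unfold Spec_merge_close_edges; infer_instance

-- ===== CLAIM (what is proved, stated in full; the proofs are below) =====
def Claim_equal_merge_close_edges : Prop := ∀ (lst : List Int) (tol : Int), Dom_merge_close_edges lst tol → Spec_merge_close_edges lst tol (merge_close_edges lst tol)

-- ===== LEMMAS AND PROOFS =====

-- reference form: group = anchor plus the takeWhile-span of the tail, rest by recursion
def pvG (tol : Int) : List Int → List Int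
  | [] => []
  | a :: rest =>
    pvRepA (a :: rest.takeWhile (fun x => |x - a| ≤ tol))
      :: pvG tol (rest.dropWhile (fun x => |x - a| ≤ tol))
termination_by l => l.length
decreasing_by
  simp only [List.length_cons]
  have := List.length_dropWhile_le (fun x => |x - a| ≤ tol) rest
  omega

theorem pvCut_eq_takeWhile (lst : List Int) (tol a : Int) (j : Nat) (hj : j ≤ lst.length) :
    pvCut lst tol a j = j + ((lst.drop j).takeWhile (fun x => |x - a| ≤ tol)).length := by
  fun_induction pvCut with
  | case1 j h hp ih =>
    rw [ih (by omega)]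
    rw [List.drop_eq_getElem_cons h, List.takeWhile_cons, if_pos (by simpa using hp)]
    simp; omega
  | case2 j h hp =>
    rw [List.drop_eq_getElem_cons h, List.takeWhile_cons, if_neg (by simpa using hp)]
    simp
  | case3 j h =>
    have : lst.drop j = [] := List.drop_eq_nil_of_le (by omega)
    simp [this]

theorem pvOuter_eq_pvG (lst : List Int) (tol : Int) (i : Nat) (hi : i ≤ lst.length) :
    pvOuter lst tol i = pvG tol (lst.drop i) := by
  fun_induction pvOuter with
  | case1 i h anchor j ih =>
    have hdrop : lst.drop i = lst[i] :: lst.drop (i + 1) := List.drop_eq_getElem_cons h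
    obtain ⟨tw, htw⟩ : ∃ tw, tw = (lst.drop (i + 1)).takeWhile (fun x => |x - lst[i]| ≤ tol) :=
      ⟨_, rfl⟩
    have hcut : j = (i + 1) + tw.length := by
      rw [htw]; exact pvCut_eq_takeWhile lst tol lst[i] (i + 1) (by omega)
    have hpref : (lst.drop (i + 1)).take tw.length = tw := by
      rw [htw]
      exact (List.prefix_iff_eq_take.mp (List.takeWhile_prefix _)).symm
    have hslice : (lst.drop i).take (j - i) = lst[i] :: tw := by
      rw [hdrop]
      have hji : j - i = tw.length + 1 := by omega
      rw [hji, List.take_succ_cons, hpref]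
    have hrest : lst.drop j = (lst.drop (i + 1)).dropWhile (fun x => |x - lst[i]| ≤ tol) := by
      have h2 : lst.drop j = (lst.drop (i + 1)).drop tw.length := by
        rw [List.drop_drop, hcut]
      rw [h2]
      conv_lhs => rw [← List.takeWhile_append_dropWhile (p := fun x => |x - lst[i]| ≤ tol)
        (l := lst.drop (i + 1)), ← htw, List.drop_left]
    have hjle : j ≤ lst.length := pvCut_le lst tol anchor (i + 1) (by omega)
    conv_rhs => rw [hdrop]
    rw [pvG, ← htw, ← hrest, ih hjle]
    congr 1
    by_cases hone : j = i + 1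
    · have htw0 : tw = [] := by
        have : tw.length = 0 := by omega
        exact List.eq_nil_of_length_eq_zero this
      rw [if_pos hone, htw0]
      simp [pvRepA]
      rfl
    · rw [if_neg hone, hslice, pvRepA, if_neg (by
        intro hlen
        apply hone
        have h0 : tw.length = 0 := by simpa using hlen
        omega)]
      congr 1
      simp
      omega
  | case2 i h =>
    have hd : lst.drop i = [] := List.drop_eq_nil_of_le (by omega)
    rw [pvG.eq_def]
    simp [hd]

-- A's loop invariant: with a nonempty buffer a :: g, the finished result is
-- the pending group's representative followed by pvG of what remains
theorem loopA (tol : Int) (xs : List Int) : ∀ (res g : List Int) (a : Int),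
    pvFinA (xs.foldl (pvStepA tol) (res, a :: g))
    = res ++ pvRepA ((a :: g) ++ xs.takeWhile (fun x => |x - a| ≤ tol))
        :: pvG tol (xs.dropWhile (fun x => |x - a| ≤ tol)) := by
  induction xs with
  | nil => intro res g a; simp [pvFinA, pvG]
  | cons x xs ih =>
    intro res g a
    by_cases hx : tol < |x - a|
    · simp only [List.foldl_cons, pvStepA, if_pos hx]
      rw [ih (res ++ [pvRepA (a :: g)]) [] x]
      rw [List.takeWhile_cons, if_neg (by simp; omega), List.dropWhile_cons,
        if_neg (by simp; omega)]
      rw [pvG]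
      simp
    · simp only [List.foldl_cons, pvStepA, if_neg hx]
      have h1 : (a :: g) ++ [x] = a :: (g ++ [x]) := by simp
      rw [h1, ih res (g ++ [x]) a]
      rw [List.takeWhile_cons, if_pos (by simp; omega), List.dropWhile_cons,
        if_pos (by simp; omega)]
      simp

theorem A_eq_pvG (lst : List Int) (tol : Int) : merge_close_edges lst tol = pvG tol lst := by
  cases lst with
  | nil => simp [merge_close_edges, pvFinA, pvG]
  | cons a xs =>
    unfold merge_close_edges
    simp only [List.foldl_cons, pvStepA]
    have h := loopA tol xs [] [] a
    simp only [List.nil_append, List.singleton_append] at h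
    rw [h, pvG]

-- ===== VERDICT (by name: the statement is the Claim_ definition above) =====
theorem merge_close_edges_spec : Claim_equal_merge_close_edges := by
  intro lst tol _
  unfold Spec_merge_close_edges merge_close_edges_alt
  rw [A_eq_pvG, pvOuter_eq_pvG lst tol 0 (by omega)]
  simp
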